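-- pv_equiv track=rewrite | github.com/fable-compiler/Fable | src/fable-library-py/fable_library/date.py | parse_quoted_string
-- ===== SOURCE A (Python) =====
-- def parse_quoted_string(format: str, pos: int) -> tuple[str, int]:
--     begin_pos = pos
--     format_length = len(format)
--     # Get the character used to quote the string
--     quote_char = format[pos]
--
--     result = ""
--     found_quote = False
--
--     while pos < format_length:
--         pos += 1
--         current_char = format[pos]
--         if current_char == quote_char:
--             found_quote = True
--             break
--         elif current_char == "\\":
--             if pos < format_length:
--                 pos += 1
--                 result += format[pos]
--             else:
--                 # This means that '\'is the last character in the format string.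
--                 raise ValueError("Invalid string format")
--         else:
--             result += current_char
--
--     if not found_quote:
--         # We couldn't find the matching quote
--         raise ValueError(f"Invalid string format could not find matching quote for {quote_char}")
--
--     return (result, pos - begin_pos + 1)
-- ===== SOURCE B (Python) =====
-- def parse_quoted_string(format: str, pos: int) -> tuple[str, int]:
--     quote_char = format[pos]
--     parts = []
--     i = pos + 1
--     while True:
--         jq = format.find(quote_char, i)
--         if jq == -1:
--             raise ValueError(
--                 f"Invalid string format could not find matching quote for {quote_char}"
--             )
--         jb = format.find("\\", i)
--         if jb == -1 or jq <= jb: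
--             parts.append(format[i:jq])
--             return ("".join(parts), jq - pos + 1)
--         parts.append(format[i:jb])
--         parts.append(format[jb + 1])
--         i = jb + 2
-- ===== Notes on version B (the rewrite author's own statement) =====
-- stated objective: alternative
-- what changed: B replaces A's per-character while-loop (one branch per character, string += char) with a slice-based scanner that uses str.find to jump directly to the next quote or backslash and appends whole slices between special characters.
-- outside the precondition, e.g. on parse_quoted_string("'a'", -3): A returns ('a', 3), B returns ('a', 6)
import Mathlib
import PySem

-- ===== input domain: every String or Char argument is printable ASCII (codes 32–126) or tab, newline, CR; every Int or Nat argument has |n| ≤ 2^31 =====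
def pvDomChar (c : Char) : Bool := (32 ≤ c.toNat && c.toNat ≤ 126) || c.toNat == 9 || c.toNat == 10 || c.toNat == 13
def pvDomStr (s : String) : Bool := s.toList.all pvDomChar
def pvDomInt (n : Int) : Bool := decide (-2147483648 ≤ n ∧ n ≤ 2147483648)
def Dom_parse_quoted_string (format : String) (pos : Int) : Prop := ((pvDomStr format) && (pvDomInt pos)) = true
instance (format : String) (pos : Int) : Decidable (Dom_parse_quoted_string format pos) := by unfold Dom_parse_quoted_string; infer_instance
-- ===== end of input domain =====

-- B rewrites A's per-character while-loop as a slice-based scanner (str.find jumps to the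
-- next quote/backslash, whole slices are appended); A = B is proved on Pre_ below.

-- ===== PORT A =====
-- A's while-loop; the parameter `pos` is the value BEFORE Python's `pos += 1` at the top of
-- the body.  The `none` arms of pyGet? are Python's IndexError and the `false` flags feed A's
-- ValueError paths; all of them are excluded by Pre_ below.
def pqsLoopA (cs : List Char) (n : Int) (q : Char) (pos : Int) (res : List Char) :
    List Char × Int × Bool :=
  if _h : pos < n then
    match PySem.List.pyGet? cs (pos + 1) with
    | none => (res, pos + 1, false)
    | some c =>
      if c = q then (res, pos + 1, true)
      else if c = '\\' then
        if pos + 1 < n then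
          match PySem.List.pyGet? cs (pos + 2) with
          | none => (res, pos + 2, false)
          | some c2 => pqsLoopA cs n q (pos + 2) (res ++ [c2])
        else (res, pos + 1, false)
      else pqsLoopA cs n q (pos + 1) (res ++ [c])
  else (res, pos, false)
termination_by (n - pos).toNat
decreasing_by all_goals omega


def parse_quoted_string (format : String) (pos : Int) : String × Int :=
  let cs := format.toList
  let n : Int := cs.length
  match PySem.List.pyGet? cs pos with
  | none => ("", 0)                            -- IndexError: format[pos] (excluded by Pre_)
  | some q =>
    match pqsLoopA cs n q pos [] with
    | (res, p, found) => if found then (String.ofList res, p - pos + 1) else ("", 0)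

-- ===== PORT B =====
-- Source B's while-True loop; the fuel (cs.length + 1) only makes the recursion structural — it
-- is never exhausted on Pre_, since the cursor advances by at least 2 past a found backslash
-- each round.  ("", 0) stands for Source B's ValueError / IndexError raises, excluded by Pre_.
def pqsLoopB (cs : List Char) (q : Char) (pos : Int) :
    Nat → Int → List Char → String × Int
  | 0, _, _ => ("", 0)
  | fuel + 1, i, parts =>
    let jq := PySem.Chars.findFrom cs [q] i none
    if jq = -1 then ("", 0)
    else
      let jb := PySem.Chars.findFrom cs ['\\'] i none
      if jb = -1 ∨ jq ≤ jb then
        (String.ofList (parts ++ PySem.List.slice cs (some i) (some jq)), jq - pos + 1)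
      else
        match PySem.List.pyGet? cs (jb + 1) with
        | none => ("", 0)
        | some c =>
          pqsLoopB cs q pos fuel (jb + 2) (parts ++ PySem.List.slice cs (some i) (some jb) ++ [c])


def parse_quoted_string_alt (format : String) (pos : Int) : String × Int :=
  let cs := format.toList
  match PySem.List.pyGet? cs pos with
  | none => ("", 0)                            -- IndexError: format[pos] (excluded by Pre_)
  | some q => pqsLoopB cs q pos (cs.length + 1) (pos + 1) []

-- ===== PRECONDITION & SPEC =====
-- okQuoted q d: scanning d left to right with backslash-escapes, an unescaped occurrence of
-- the quote character q is reached (no trailing backslash runs off the end first).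
def okQuoted (q : Char) : List Char → Bool
  | [] => false
  | [c] => c = q
  | c :: c2 :: rest =>
    if c = q then true
    else if c = '\\' then okQuoted q rest
    else okQuoted q (c2 :: rest)


-- Pre_ excludes (a) the inputs on which A raises (pos out of range: IndexError; no reachable
-- matching quote after pos: ValueError, or IndexError when the scan runs off the end), and
-- (b) negative in-range pos, on which A still returns a value but only through Python's
-- negative-index wraparound (the scan starts before position 0 and re-reads the string) — an
-- accidental corner no caller relies on, which B's clamping str.find has no reason to mimic.
def Pre_parse_quoted_string (format : String) (pos : Int) : Prop :=
  0 ≤ pos ∧ pos < format.toList.length ∧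
  okQuoted (format.toList.getD pos.toNat ' ') (format.toList.drop (pos.toNat + 1)) = true

instance (format : String) (pos : Int) : Decidable (Pre_parse_quoted_string format pos) := by
  unfold Pre_parse_quoted_string; infer_instance

def pvWitness_parse_quoted_string : String × Int := ("'abc'", 0)

def Spec_parse_quoted_string (format : String) (pos : Int) (out : String × Int) : Prop :=
  out = parse_quoted_string_alt format pos
instance (format : String) (pos : Int) (out : String × Int) :
    Decidable (Spec_parse_quoted_string format pos out) := by
  unfold Spec_parse_quoted_string; infer_instance

-- ===== CLAIM (what is proved, stated in full; the proofs are below) =====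
def Claim_equal_parse_quoted_string : Prop :=
  ∀ (format : String) (pos : Int), Dom_parse_quoted_string format pos →
    Pre_parse_quoted_string format pos →
    Spec_parse_quoted_string format pos (parse_quoted_string format pos)

-- ===== LEMMAS AND PROOFS =====

lemma single_prefix_iff (c : Char) (l : List Char) : [c] <+: l ↔ l.head? = some c := by
  cases l with
  | nil => simp
  | cons a t => simp [List.prefix_cons_iff, eq_comm]

lemma okQuoted_mem (q : Char) : ∀ (d : List Char), okQuoted q d = true → q ∈ d
  | [] => by simp [okQuoted]
  | [c] => by simp [okQuoted, eq_comm]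
  | c :: c2 :: rest => fun h => by
    by_cases hc : c = q
    · exact hc ▸ List.mem_cons_self ..
    · by_cases hb : c = '\\'
      · simp only [okQuoted, if_neg hc, if_pos hb] at h
        exact List.mem_cons_of_mem _ (List.mem_cons_of_mem _ (okQuoted_mem q rest h))
      · simp only [okQuoted, if_neg hc, if_neg hb] at h
        exact List.mem_cons_of_mem _ (okQuoted_mem q (c2 :: rest) h)
termination_by d => d.length

lemma okQuoted_cons (q c : Char) (rest : List Char) (hc : c ≠ q) (hb : c ≠ '\\') :
    okQuoted q (c :: rest) = okQuoted q rest := by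
  cases rest with
  | nil => simp [okQuoted, hc]
  | cons c2 r => simp [okQuoted, hc, hb]

lemma okQuoted_drop (q : Char) : ∀ (k : Nat) (d : List Char), okQuoted q d = true →
    (∀ t, t < k → ∀ (ht : t < d.length), d[t] ≠ q ∧ d[t] ≠ '\\') →
    okQuoted q (d.drop k) = true
  | 0, d => fun h _ => h
  | k + 1, d => fun h hs => by
    cases d with
    | nil => simp [okQuoted] at h
    | cons c rest =>
      have h0 := hs 0 (by omega) (by simp)
      simp only [List.getElem_cons_zero] at h0
      rw [okQuoted_cons q c rest h0.1 h0.2] at h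
      simpa using okQuoted_drop q k rest h
        (fun t ht htl => by simpa using hs (t+1) (by omega) (by simpa using htl))
lemma pqsLoopA_skip (cs : List Char) (q : Char) :
    ∀ (k : Nat), ∀ (i : Nat) (res : List Char), i + k ≤ cs.length →
    (∀ t, t < k → ∀ (ht : i + t < cs.length), cs[i + t] ≠ q ∧ cs[i + t] ≠ '\\') →
    pqsLoopA cs cs.length q ((i : Int) - 1) res =
      pqsLoopA cs cs.length q ((i : Int) + k - 1) (res ++ (cs.drop i).take k)
  | 0 => fun i res _ _ => by simp
  | k + 1 => fun i res hle hs => by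
    have hi : i < cs.length := by omega
    have hget : PySem.List.pyGet? cs (((i : Int) - 1) + 1) = some cs[i] := by
      have : ((i : Int) - 1) + 1 = (i : Nat) := by omega
      rw [this, PySem.List.pyGet?_natCast]
      simp [hi]
    have h0 := hs 0 (by omega) (by omega)
    simp only [Nat.add_zero] at h0
    rw [pqsLoopA, hget]
    rw [dif_pos (show ((i : Int) - 1) < ((cs.length : Nat) : Int) by omega)]
    simp only [if_neg h0.1, if_neg h0.2]
    have heq : (i : Int) - 1 + 1 = ((i + 1 : Nat) : Int) - 1 := by omega
    rw [heq, pqsLoopA_skip cs q k (i+1) (res ++ [cs[i]]) (by omega)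
      (fun t ht htl => by
        have := hs (t+1) (by omega) (by omega)
        simpa [Nat.add_assoc, Nat.add_comm 1 t] using this)]
    congr 1
    · push_cast; ring
    · rw [List.drop_eq_getElem_cons hi, List.take_succ_cons]
      simp
termination_by k => k

lemma pqs_main (cs : List Char) (q : Char) (pos : Int) :
    ∀ (fuel : Nat) (i : Nat) (parts : List Char), i ≤ cs.length →
    cs.length - i < fuel → okQuoted q (cs.drop i) = true →
    ∃ res p, pqsLoopA cs cs.length q ((i : Int) - 1) parts = (res, p, true) ∧
      pqsLoopB cs q pos fuel (i : Int) parts = (String.ofList res, p - pos + 1)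
  | 0 => fun i parts _ hfuel _ => absurd hfuel (by omega)
  | fuel + 1 => fun i parts hile hfuel hok => by
    -- basic shape facts
    have hdne : cs.drop i ≠ [] := by
      intro hnil; rw [hnil] at hok; simp [okQuoted] at hok
    have hilt : i < cs.length := by
      by_contra hc
      exact hdne (List.drop_eq_nil_iff.mpr (by omega))
    have hdlen : (cs.drop i).length = cs.length - i := by simp
    -- the first quote after i
    set fq := PySem.Chars.find (cs.drop i) [q] with hfq_def
    have hqmem : q ∈ cs.drop i := okQuoted_mem q _ hok
    have hfq0 : 0 ≤ fq := (PySem.Chars.find_nonneg_iff _ _).mpr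
      ((List.singleton_infix_iff q _).mpr hqmem)
    obtain ⟨hq_pre, hq_min⟩ := PySem.Chars.find_spec hfq0
    set kq := fq.toNat with hkq_def
    have hq_head : (cs.drop (i + kq)).head? = some q := by
      have := (single_prefix_iff q _).mp hq_pre
      rwa [List.drop_drop] at this
    have hq_get : cs[i + kq]? = some q := by rwa [List.head?_drop] at hq_head
    have hq_lt : i + kq < cs.length := by
      by_contra hc
      rw [List.getElem?_eq_none (by omega)] at hq_get; simp at hq_get
    have hq_elem : cs[i + kq] = q := by
      rw [List.getElem?_eq_getElem hq_lt] at hq_get; exact Option.some.inj hq_get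
    have hkq_lt : kq < cs.length - i := by omega
    -- the first backslash after i
    set fb := PySem.Chars.find (cs.drop i) ['\\'] with hfb_def
    have hfb_ge : -1 ≤ fb := PySem.Chars.neg_one_le_find _ _
    -- characters strictly before the first quote are not q
    have hnotq : ∀ t, t < kq → cs[i + t]? ≠ some q := by
      intro t ht hcq
      have : [q] <+: (cs.drop i).drop t := by
        rw [single_prefix_iff, List.drop_drop, List.head?_drop]
        exact hcq
      exact hq_min t ht this
    -- findFrom values
    have hjq : PySem.Chars.findFrom cs [q] (i : Int) none = (i : Int) + fq := by
      rw [PySem.Chars.findFrom_natCast cs [q] i hile, ← hfq_def, if_neg (by omega)]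
    have hjq_ne : ((i : Int) + fq) ≠ -1 := by omega
    by_cases hcase : fb = -1 ∨ fq ≤ fb
    · -- the quote comes first: both sides finish here
      -- characters before the quote are ordinary
      have hnos : ∀ t, t < kq → ∀ (ht : i + t < cs.length), cs[i + t] ≠ q ∧ cs[i + t] ≠ '\\' := by
        intro t ht hlt2
        constructor
        · intro hcq; exact hnotq t ht (by rw [List.getElem?_eq_getElem hlt2, hcq])
        · intro hcb
          have hbpre : ['\\'] <+: (cs.drop i).drop t := by
            rw [single_prefix_iff, List.drop_drop, List.head?_drop,
              List.getElem?_eq_getElem hlt2, hcb]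
          rcases hcase with hb1 | hb2
          · exact (PySem.Chars.find_eq_neg_one_iff _ _).mp hb1
              (hbpre.isInfix.trans (List.drop_suffix t (cs.drop i)).isInfix)
          · obtain ⟨_, hb_min⟩ := PySem.Chars.find_spec (le_trans hfq0 hb2)
            exact hb_min t (by omega) hbpre
      -- A: skip to the quote, then take the found-quote branch
      rw [pqsLoopA_skip cs q kq i parts (by omega) hnos]
      rw [pqsLoopA]
      rw [dif_pos (show (i : Int) + kq - 1 < ((cs.length : Nat) : Int) by omega)]
      have hget1 : PySem.List.pyGet? cs ((i : Int) + kq - 1 + 1) = some q := by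
        have h1 : (i : Int) + kq - 1 + 1 = ((i + kq : Nat) : Int) := by omega
        rw [h1, PySem.List.pyGet?_natCast, hq_get]
      rw [hget1]
      simp only [↓reduceIte]
      -- B: guard jq ≤ jb (or jb = -1) holds
      refine ⟨parts ++ (cs.drop i).take kq, (i : Int) + kq - 1 + 1, rfl, ?_⟩
      rw [pqsLoopB]
      simp only [hjq]
      rw [if_neg hjq_ne]
      have hjb : PySem.Chars.findFrom cs ['\\'] (i : Int) none =
          if fb = -1 then -1 else (i : Int) + fb := by
        rw [PySem.Chars.findFrom_natCast cs ['\\'] i hile, ← hfb_def]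
      rw [hjb]
      rw [if_pos (by rcases hcase with h | h; · left; rw [if_pos h]
                     · right; rw [if_neg (by omega)]; omega)]
      have hfq_cast : fq = (kq : Int) := by omega
      rw [hfq_cast, PySem.List.slice_natCast_add cs i kq, Prod.mk.injEq]
      exact ⟨rfl, by ring⟩
    · -- a backslash comes first: one escape step, then recurse
      have hfbne : fb ≠ -1 := fun h => hcase (Or.inl h)
      have hlt : fb < fq := by by_contra h; exact hcase (Or.inr (by omega))
      have hfb0 : 0 ≤ fb := by omega
      obtain ⟨hb_pre, hb_min⟩ := PySem.Chars.find_spec hfb0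
      set kb := fb.toNat with hkb_def
      have hkb_lt : kb < kq := by omega
      have hb_head : (cs.drop (i + kb)).head? = some '\\' := by
        have := (single_prefix_iff '\\' _).mp hb_pre
        rwa [List.drop_drop] at this
      have hb_get : cs[i + kb]? = some '\\' := by rwa [List.head?_drop] at hb_head
      have hb_lt : i + kb < cs.length := by
        by_contra hc
        rw [List.getElem?_eq_none (by omega)] at hb_get; simp at hb_get
      have hb_elem : cs[i + kb] = '\\' := by
        rw [List.getElem?_eq_getElem hb_lt] at hb_get; exact Option.some.inj hb_get
      have hqne : q ≠ '\\' := by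
        intro hq
        exact hnotq kb hkb_lt (by rw [List.getElem?_eq_getElem hb_lt, hb_elem, hq])
      -- characters before the backslash are ordinary
      have hnos : ∀ t, t < kb → ∀ (ht : i + t < cs.length), cs[i + t] ≠ q ∧ cs[i + t] ≠ '\\' := by
        intro t ht hlt2
        constructor
        · intro hcq; exact hnotq t (by omega) (by rw [List.getElem?_eq_getElem hlt2, hcq])
        · intro hcb
          exact hb_min t ht (by
            rw [single_prefix_iff, List.drop_drop, List.head?_drop,
              List.getElem?_eq_getElem hlt2, hcb])
      -- okQuoted survives to the character after the escape
      have hok_kb : okQuoted q (cs.drop (i + kb)) = true := by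
        rw [← List.drop_drop]
        refine okQuoted_drop q kb (cs.drop i) hok ?_
        intro t ht htl
        have h2 : i + t < cs.length := by simp at htl; omega
        rw [List.getElem_drop]
        exact hnos t ht h2
      have hdne2 : cs.drop (i + kb + 1) ≠ [] := by
        intro hnil
        rw [List.drop_eq_getElem_cons hb_lt, hb_elem] at hok_kb
        rw [show i + kb + 1 = (i + kb) + 1 from rfl] at hnil
        rw [hnil] at hok_kb
        simp [okQuoted] at hok_kb
        exact hqne hok_kb.symm
      have hb1_lt : i + kb + 1 < cs.length := by
        by_contra hc
        exact hdne2 (List.drop_eq_nil_iff.mpr (by omega))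
      have hokr : okQuoted q (cs.drop (i + kb + 2)) = true := by
        rw [List.drop_eq_getElem_cons hb_lt, hb_elem,
          List.drop_eq_getElem_cons hb1_lt] at hok_kb
        simpa [okQuoted, Ne.symm hqne, show i + kb + 1 + 1 = i + kb + 2 from rfl] using hok_kb
      have hget2 : PySem.List.pyGet? cs ((i : Int) + fb + 1) = some cs[i + kb + 1] := by
        have h1 : (i : Int) + fb + 1 = ((i + kb + 1 : Nat) : Int) := by omega
        rw [h1, PySem.List.pyGet?_natCast, List.getElem?_eq_getElem hb1_lt]
      -- apply the induction hypothesis after the escape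
      obtain ⟨res, p, hA, hB⟩ := pqs_main cs q pos fuel (i + kb + 2)
        (parts ++ (cs.drop i).take kb ++ [cs[i + kb + 1]])
        (by omega) (by omega) hokr
      refine ⟨res, p, ?_, ?_⟩
      · -- A side
        rw [pqsLoopA_skip cs q kb i parts (by omega) hnos]
        rw [pqsLoopA]
        rw [dif_pos (show (i : Int) + kb - 1 < ((cs.length : Nat) : Int) by omega)]
        have hgetb : PySem.List.pyGet? cs ((i : Int) + kb - 1 + 1) = some '\\' := by
          have h1 : (i : Int) + kb - 1 + 1 = ((i + kb : Nat) : Int) := by omega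
          rw [h1, PySem.List.pyGet?_natCast, hb_get]
        rw [hgetb]
        simp only [if_neg (Ne.symm hqne), ↓reduceIte]
        rw [if_pos (show (i : Int) + kb - 1 + 1 < ((cs.length : Nat) : Int) by omega)]
        have hgetc : PySem.List.pyGet? cs ((i : Int) + kb - 1 + 2) = some cs[i + kb + 1] := by
          have h1 : (i : Int) + kb - 1 + 2 = ((i + kb + 1 : Nat) : Int) := by omega
          rw [h1, PySem.List.pyGet?_natCast, List.getElem?_eq_getElem hb1_lt]
        rw [hgetc]
        have h2 : (i : Int) + kb - 1 + 2 = ((i + kb + 2 : Nat) : Int) - 1 := by omega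
        rw [h2]; exact hA
      · -- B side
        rw [pqsLoopB]
        simp only [hjq]
        rw [if_neg hjq_ne]
        have hjb : PySem.Chars.findFrom cs ['\\'] (i : Int) none = (i : Int) + fb := by
          rw [PySem.Chars.findFrom_natCast cs ['\\'] i hile, ← hfb_def, if_neg hfbne]
        rw [hjb]
        rw [if_neg (by intro hor; rcases hor with h | h <;> omega)]
        rw [hget2]
        have hfb_cast : fb = (kb : Int) := by omega
        have h3 : (i : Int) + fb + 2 = ((i + kb + 2 : Nat) : Int) := by omega
        rw [h3]
        have h4 : PySem.List.slice cs (some (i : Int)) (some ((i : Int) + fb)) =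
            (cs.drop i).take kb := by
          rw [hfb_cast, PySem.List.slice_natCast_add cs i kb]
        rw [h4]; exact hB

-- ===== VERDICT (by name: the statement is the Claim_ definition above) =====
theorem parse_quoted_string_spec : Claim_equal_parse_quoted_string := by
  intro format pos _ hpre
  obtain ⟨hpos0, hposlt, hok⟩ := hpre
  unfold Spec_parse_quoted_string
  set cs := format.toList with hcs
  have hlt : pos.toNat < cs.length := by omega
  have hq_getD : cs.getD pos.toNat ' ' = cs[pos.toNat] := List.getD_eq_getElem cs ' ' hlt
  rw [hq_getD] at hok
  have hpy : PySem.List.pyGet? cs pos = some cs[pos.toNat] := by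
    have h1 : PySem.List.pyGet? cs ((pos.toNat : Nat) : Int) = some cs[pos.toNat] := by
      rw [PySem.List.pyGet?_natCast, List.getElem?_eq_getElem hlt]
    rwa [show ((pos.toNat : Nat) : Int) = pos by omega] at h1
  obtain ⟨res, p, hA, hB⟩ := pqs_main cs cs[pos.toNat] pos (cs.length + 1)
    (pos.toNat + 1) [] (by omega) (by omega) hok
  rw [show ((pos.toNat + 1 : Nat) : Int) - 1 = pos by omega] at hA
  rw [show ((pos.toNat + 1 : Nat) : Int) = pos + 1 by omega] at hB
  show parse_quoted_string format pos = parse_quoted_string_alt format pos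
  unfold parse_quoted_string parse_quoted_string_alt
  rw [← hcs]
  simp only [hpy, hA, hB, if_true]
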